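-- pv_equiv track=rewrite | github.com/soyukke/lean-unsolved | scripts/collatz_galton_watson_deep.py | syracuse_inverse_list
-- ===== SOURCE A (Python) =====
-- def syracuse_inverse_list(m, max_k=60):
--     inverses = []
--     pow2 = 2
--     for k in range(1, max_k + 1):
--         val = pow2 * m - 1
--         if val % 3 == 0:
--             result = val // 3
--             if result > 0 and result % 2 == 1:
--                 inverses.append(result)
--         pow2 *= 2
--     return inverses
-- ===== SOURCE B (Python) =====
-- def syracuse_inverse_list(m, max_k=60):
--     # k qualifies iff 2**k * m == 1 (mod 3): never when m % 3 == 0,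
--     # odd k when m % 3 == 2, even k when m % 3 == 1 -- so walk only that parity.
--     r = m % 3
--     if r == 0:
--         return []
--     out = []
--     for k in range(1 if r == 2 else 2, max_k + 1, 2):
--         result = (2 ** k * m - 1) // 3
--         if result > 0 and result % 2 == 1:
--             out.append(result)
--     return out
-- ===== Notes on version B (the rewrite author's own statement) =====
-- stated objective: alternative
-- what changed: B replaces A's scan of every k with a carried pow2 and a %3 test by a number-theoretic decomposition: it computes m % 3 once, returns [] when it is 0, and otherwise iterates only over the qualifying parity of k (step-2 range), computing (2**k*m-1)//3 directly with no divisibility test.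
import Mathlib
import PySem

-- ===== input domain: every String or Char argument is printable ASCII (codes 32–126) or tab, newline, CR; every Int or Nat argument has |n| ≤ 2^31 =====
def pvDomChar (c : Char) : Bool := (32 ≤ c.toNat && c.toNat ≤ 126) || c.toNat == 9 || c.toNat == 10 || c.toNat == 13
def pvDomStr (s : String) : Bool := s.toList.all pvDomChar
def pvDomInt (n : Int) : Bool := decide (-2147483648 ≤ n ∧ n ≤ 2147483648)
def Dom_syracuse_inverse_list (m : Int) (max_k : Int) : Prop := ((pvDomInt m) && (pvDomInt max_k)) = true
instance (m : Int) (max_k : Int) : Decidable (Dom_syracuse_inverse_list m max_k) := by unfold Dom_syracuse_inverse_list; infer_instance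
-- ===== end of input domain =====

-- B decides divisibility by 3 up front from m % 3 and walks only the qualifying parity of k
-- (a different decomposition; not measurably faster at the tested sizes).

-- ===== PORT A =====
-- A scans every k in 1..max_k, carrying pow2 = 2^k in the loop state and testing val % 3 == 0.
def syracuse_inverse_list (m : Int) (max_k : Int) : List Int :=
  ((PySem.List.pyRange 1 (max_k + 1) 1).foldl
      (fun (st : List Int × Int) (_k : Int) =>
        let val := st.2 * m - 1
        let inverses :=
          if PySem.Int.mod val 3 = 0 then
            let result := PySem.Int.floordiv val 3
            if result > 0 ∧ PySem.Int.mod result 2 = 1 then st.1 ++ [result] else st.1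
          else st.1
        (inverses, st.2 * 2))
      ([], 2)).1

-- ===== PORT B =====
def syracuse_inverse_list_alt (m : Int) (max_k : Int) : List Int :=
  let r := PySem.Int.mod m 3
  if r = 0 then []
  else
    (PySem.List.pyRange (if r = 2 then 1 else 2) (max_k + 1) 2).foldl
      (fun out k =>
        let result := PySem.Int.floordiv ((2 : Int) ^ k.toNat * m - 1) 3
        if result > 0 ∧ PySem.Int.mod result 2 = 1 then out ++ [result] else out) []

-- ===== PRECONDITION & SPEC =====
def Spec_syracuse_inverse_list (m : Int) (max_k : Int) (out : List Int) : Prop := out = syracuse_inverse_list_alt m max_k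
instance (m : Int) (max_k : Int) (out : List Int) : Decidable (Spec_syracuse_inverse_list m max_k out) := by unfold Spec_syracuse_inverse_list; infer_instance

-- ===== CLAIM (what is proved, stated in full; the proofs are below) =====
def Claim_equal_syracuse_inverse_list : Prop := ∀ (m : Int) (max_k : Int), Dom_syracuse_inverse_list m max_k → Spec_syracuse_inverse_list m max_k (syracuse_inverse_list m max_k)

-- ===== LEMMAS AND PROOFS =====

-- proof-only helpers: the shared element function and the two filter predicates
def pvF (m k : Int) : Int := PySem.Int.floordiv ((2 : Int) ^ k.toNat * m - 1) 3
def pvQ (m k : Int) : Bool := decide (pvF m k > 0 ∧ PySem.Int.mod (pvF m k) 2 = 1)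
def pvP (m k : Int) : Bool :=
  decide (PySem.Int.mod ((2 : Int) ^ k.toNat * m - 1) 3 = 0) && pvQ m k

lemma pv_fmod3 (a : Int) : PySem.Int.mod a 3 = a % 3 := by
  simp [PySem.Int.mod, Int.fmod_eq_emod]

-- divisibility by 3 of 2^k*m - 1 is decided by m % 3 and the parity of k
lemma pv_div3_iff (m k : Int) (hk : 0 ≤ k) :
    PySem.Int.mod ((2 : Int) ^ k.toNat * m - 1) 3 = 0 ↔
      ((m % 3 = 1 ∧ k % 2 = 0) ∨ (m % 3 = 2 ∧ k % 2 = 1)) := by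
  rw [pv_fmod3]
  have hpow : (2 : Int) ^ k.toNat ≡ (-1 : Int) ^ k.toNat [ZMOD 3] :=
    (by decide : (2 : Int) ≡ -1 [ZMOD 3]).pow k.toNat
  have hmod : ((2 : Int) ^ k.toNat * m - 1) ≡ ((-1 : Int) ^ k.toNat * m - 1) [ZMOD 3] :=
    (hpow.mul_right m).sub_right 1
  have hdvd : ((2 : Int) ^ k.toNat * m - 1) % 3 = 0 ↔
      ((-1 : Int) ^ k.toNat * m - 1) % 3 = 0 := by
    unfold Int.ModEq at hmod; omega
  rw [hdvd]
  rcases Nat.even_or_odd k.toNat with he | ho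
  · rw [he.neg_one_pow]
    have hk2 : k % 2 = 0 := by rcases he with ⟨c, hc⟩; omega
    constructor
    · intro h; exact Or.inl ⟨by omega, hk2⟩
    · rintro (⟨h1, _⟩ | ⟨_, h2⟩) <;> omega
  · rw [ho.neg_one_pow]
    have hk2 : k % 2 = 1 := by rcases ho with ⟨c, hc⟩; omega
    constructor
    · intro h; exact Or.inr ⟨by omega, hk2⟩
    · rintro (⟨_, h2⟩ | ⟨h1, _⟩) <;> omega

-- eliminating A's carried pow2 state: at element a of the range the carried power is 2^a
lemma pv_A_state (m : Int) (n : Nat) : ∀ (a : Int), 1 ≤ a → ∀ (acc : List Int),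
    (((PySem.List.pyRange a (a + n) 1).foldl
        (fun (st : List Int × Int) (_k : Int) =>
          let val := st.2 * m - 1
          let inverses :=
            if PySem.Int.mod val 3 = 0 then
              let result := PySem.Int.floordiv val 3
              if result > 0 ∧ PySem.Int.mod result 2 = 1 then st.1 ++ [result] else st.1
            else st.1
          (inverses, st.2 * 2))
        (acc, (2 : Int) ^ a.toNat)).1)
    = (PySem.List.pyRange a (a + n) 1).foldl
        (fun out k => if pvP m k = true then out ++ [pvF m k] else out) acc := by
  induction n with
  | zero =>
      intro a _ acc
      simp
  | succ n ih =>
      intro a ha acc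
      have hlt : a < a + ((n + 1 : Nat) : Int) := by push_cast; omega
      have hstop : a + ((n + 1 : Nat) : Int) = (a + 1) + (n : Int) := by push_cast; omega
      rw [PySem.List.pyRange_one_cons hlt, hstop, List.foldl_cons, List.foldl_cons]
      have hpow : (2 : Int) ^ a.toNat * 2 = (2 : Int) ^ (a + 1).toNat := by
        have h1 : (a + 1).toNat = a.toNat + 1 := by omega
        rw [h1, pow_succ]
      have hbody :
          (if PySem.Int.mod ((2 : Int) ^ a.toNat * m - 1) 3 = 0 then
              if PySem.Int.floordiv ((2 : Int) ^ a.toNat * m - 1) 3 > 0 ∧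
                  PySem.Int.mod (PySem.Int.floordiv ((2 : Int) ^ a.toNat * m - 1) 3) 2 = 1 then
                acc ++ [PySem.Int.floordiv ((2 : Int) ^ a.toNat * m - 1) 3]
              else acc
            else acc)
          = (if pvP m a = true then acc ++ [pvF m a] else acc) := by
        simp only [pvP, pvQ, pvF, Bool.and_eq_true, decide_eq_true_eq]
        split_ifs <;> tauto
      show ((PySem.List.pyRange (a + 1) ((a + 1) + (n : Int)) 1).foldl
        (fun (st : List Int × Int) (_k : Int) =>
          let val := st.2 * m - 1
          let inverses :=
            if PySem.Int.mod val 3 = 0 then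
              let result := PySem.Int.floordiv val 3
              if result > 0 ∧ PySem.Int.mod result 2 = 1 then st.1 ++ [result] else st.1
            else st.1
          (inverses, st.2 * 2))
        ((if PySem.Int.mod ((2 : Int) ^ a.toNat * m - 1) 3 = 0 then
              if PySem.Int.floordiv ((2 : Int) ^ a.toNat * m - 1) 3 > 0 ∧
                  PySem.Int.mod (PySem.Int.floordiv ((2 : Int) ^ a.toNat * m - 1) 3) 2 = 1 then
                acc ++ [PySem.Int.floordiv ((2 : Int) ^ a.toNat * m - 1) 3]
              else acc
            else acc), (2 : Int) ^ a.toNat * 2)).1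
        = List.foldl (fun out k => if pvP m k = true then out ++ [pvF m k] else out)
            (if pvP m a = true then acc ++ [pvF m a] else acc)
            (PySem.List.pyRange (a + 1) ((a + 1) + (n : Int)) 1)
      rw [hbody, hpow]
      exact ih (a + 1) (by omega) _

-- A's fold is a filtered map over the full range
lemma pv_A_char (m max_k : Int) :
    syracuse_inverse_list m max_k
      = ((PySem.List.pyRange 1 (max_k + 1) 1).filter (pvP m)).map (pvF m) := by
  by_cases h : max_k + 1 ≤ 1
  · rw [syracuse_inverse_list, PySem.List.pyRange_one_eq_nil h]
    simp
  · have hmk : 0 ≤ max_k := by omega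
    have hn : max_k + 1 = 1 + (max_k.toNat : Int) := by omega
    have hst := pv_A_state m max_k.toNat 1 le_rfl []
    simp only [Int.toNat_one, pow_one] at hst
    rw [syracuse_inverse_list, hn, hst, PySem.List.foldl_append_if]
    simp

-- B's fold is a filtered map over the parity-restricted range
lemma pv_B_char (m max_k : Int) (hr : PySem.Int.mod m 3 ≠ 0) :
    syracuse_inverse_list_alt m max_k
      = ((PySem.List.pyRange (if PySem.Int.mod m 3 = 2 then 1 else 2) (max_k + 1) 2).filter
          (pvQ m)).map (pvF m) := by
  rw [syracuse_inverse_list_alt]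
  simp only [if_neg hr]
  have hfun : (fun (out : List Int) (k : Int) =>
      let result := PySem.Int.floordiv ((2 : Int) ^ k.toNat * m - 1) 3
      if result > 0 ∧ PySem.Int.mod result 2 = 1 then out ++ [result] else out)
      = (fun out k => if pvQ m k = true then out ++ [pvF m k] else out) := by
    funext out k
    simp only [pvQ, pvF, decide_eq_true_eq]
  rw [hfun, PySem.List.foldl_append_if]
  simp

-- two strictly increasing lists with the same members are equal
lemma pv_sorted_mem_eq (l1 l2 : List Int)
    (h1 : l1.Pairwise (· < ·)) (h2 : l2.Pairwise (· < ·))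
    (hm : ∀ x, x ∈ l1 ↔ x ∈ l2) : l1 = l2 := by
  have nd1 : l1.Nodup := h1.imp (fun h => ne_of_lt h)
  have nd2 : l2.Nodup := h2.imp (fun h => ne_of_lt h)
  have hperm : l1.Perm l2 := (List.perm_ext_iff_of_nodup nd1 nd2).2 hm
  exact List.eq_of_perm_of_sorted (fun a b _ _ hab hba => absurd hba (lt_asymm hab)) h1 h2 hperm

lemma pv_pairwise_two (a b : Int) :
    (PySem.List.pyRange a b 2).Pairwise (· < ·) := by
  rw [PySem.List.pyRange_of_pos a b (by norm_num : (0 : Int) < 2)]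
  refine List.Pairwise.map _ ?_ List.pairwise_lt_range
  intro i j hij
  have : (i : Int) < (j : Int) := by exact_mod_cast hij
  omega

-- the parity-filtered full range equals the step-2 range, under the same inner test
lemma pv_filter_eq (m max_k : Int) (hr : m % 3 = 1 ∨ m % 3 = 2) :
    (PySem.List.pyRange 1 (max_k + 1) 1).filter (pvP m)
      = (PySem.List.pyRange (if PySem.Int.mod m 3 = 2 then 1 else 2) (max_k + 1) 2).filter
          (pvQ m) := by
  apply pv_sorted_mem_eq
  · exact (PySem.List.pairwise_lt_pyRange_one 1 (max_k + 1)).filter _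
  · exact (pv_pairwise_two _ _).filter _
  · intro x
    simp only [List.mem_filter, PySem.List.mem_pyRange_one,
      PySem.List.mem_pyRange_iff_of_pos (by norm_num : (0 : Int) < 2)]
    by_cases hx : 1 ≤ x
    · have hdiv := pv_div3_iff m x (by omega)
      have hp : pvP m x = true ↔
          (((m % 3 = 1 ∧ x % 2 = 0) ∨ (m % 3 = 2 ∧ x % 2 = 1)) ∧ pvQ m x = true) := by
        simp only [pvP, Bool.and_eq_true, decide_eq_true_eq]
        rw [hdiv]
      rw [hp, pv_fmod3]
      rcases hr with h | h
      · rw [if_neg (by omega)]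
        constructor
        · rintro ⟨⟨ha, hb⟩, hc, hd⟩; exact ⟨⟨by omega, hb, by omega⟩, hd⟩
        · rintro ⟨⟨ha, hb, hc⟩, hd⟩; exact ⟨⟨by omega, hb⟩, Or.inl ⟨h, by omega⟩, hd⟩
      · rw [if_pos (by omega)]
        constructor
        · rintro ⟨⟨ha, hb⟩, hc, hd⟩; exact ⟨⟨by omega, hb, by omega⟩, hd⟩
        · rintro ⟨⟨ha, hb, hc⟩, hd⟩; exact ⟨⟨by omega, hb⟩, Or.inr ⟨h, by omega⟩, hd⟩
    · constructor
      · rintro ⟨⟨ha, -⟩, -⟩; omega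
      · rintro ⟨⟨ha, -⟩, -⟩
        split_ifs at ha <;> omega

-- ===== VERDICT (by name: the statement is the Claim_ definition above) =====
theorem syracuse_inverse_list_spec : Claim_equal_syracuse_inverse_list := by
  intro m max_k _
  unfold Spec_syracuse_inverse_list
  rw [pv_A_char]
  by_cases h0 : PySem.Int.mod m 3 = 0
  · rw [syracuse_inverse_list_alt]
    simp only [if_pos h0]
    have h0' : m % 3 = 0 := by rw [pv_fmod3] at h0; exact h0
    have : (PySem.List.pyRange 1 (max_k + 1) 1).filter (pvP m) = [] := by
      rw [List.filter_eq_nil_iff]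
      intro x hx
      have hx1 : 1 ≤ x := (PySem.List.mem_pyRange_one.1 hx).1
      simp only [pvP, Bool.and_eq_true, decide_eq_true_eq]
      rintro ⟨hd, -⟩
      rcases (pv_div3_iff m x (by omega)).1 hd with ⟨h1, -⟩ | ⟨h1, -⟩ <;> omega
    rw [this]
    simp
  · have hr : m % 3 = 1 ∨ m % 3 = 2 := by
      rw [pv_fmod3] at h0; omega
    rw [pv_B_char m max_k h0, pv_filter_eq m max_k hr]
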